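-- pv_equiv track=rewrite | github.com/Wenszel/agh-algorithms-and-data-structures | exams/mock_exams/IX/egzP9b/egzP9b.py | dyrektor
-- ===== SOURCE A (Python) =====
-- def find_eulerian_cycle(graph):
--     stack = []
--     cycle = []
--     stack.append(0)
--
--     while stack:
--         current_vertex = stack[-1]
--         if graph[current_vertex]:
--             stack.append(graph[current_vertex].pop())
--         else:
--             cycle.append(stack.pop())
--     return cycle[::-1]
--
-- def dyrektor( G, R ):
--     n = len(G)
--     L = [[] for _ in range(n)]
--     for i in range(n):
--         for j in G[i]:
--             if j not in R[i]:
--                 L[i].append(j)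
--             else:
--                 R[i].remove(j)
--
--     return find_eulerian_cycle(L)
-- ===== SOURCE B (Python) =====
-- def dyrektor(G, R):
--     # Return-value equivalent to A; A mutates R in place, B leaves R unchanged.
--     n = len(G)
--     L = []
--     for i in range(n):
--         gi = G[i]
--         if not gi:
--             L.append([])
--             continue
--         quota = {}
--         for x in R[i]:
--             quota[x] = quota.get(x, 0) + 1
--         seen = {}
--         row = []
--         for j in gi:
--             c = seen.get(j, 0) + 1
--             seen[j] = c
--             if c > quota.get(j, 0):
--                 row.append(j)
--         L.append(row)
--
--     # Euler walk: frames of [vertex, finished child segments]; the cycle is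
--     # assembled front-to-back from segments — no vertex stack of the walk,
--     # no global cycle list, no final reversal.
--     frames = [[0, []]]
--     while True:
--         v, segs = frames[-1]
--         if L[v]:
--             frames.append([L[v].pop(), []])
--         else:
--             frames.pop()
--             seg = [v]
--             while segs:
--                 seg += segs.pop()
--             if not frames:
--                 return seg
--             frames[-1][1].append(seg)
-- ===== Notes on version B (the rewrite author's own statement) =====
-- stated objective: alternative
-- what changed: B filters each row by occurrence counting (keep the k-th occurrence of j iff k exceeds j's multiplicity in R[i], so R is never mutated; return value unchanged) and replaces A's Eulerian walk (vertex stack + postorder cycle list + final [::-1]) by frames that compose the cycle front-to-back from per-vertex child segments, with no global cycle list and no reversal.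
import Mathlib
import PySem

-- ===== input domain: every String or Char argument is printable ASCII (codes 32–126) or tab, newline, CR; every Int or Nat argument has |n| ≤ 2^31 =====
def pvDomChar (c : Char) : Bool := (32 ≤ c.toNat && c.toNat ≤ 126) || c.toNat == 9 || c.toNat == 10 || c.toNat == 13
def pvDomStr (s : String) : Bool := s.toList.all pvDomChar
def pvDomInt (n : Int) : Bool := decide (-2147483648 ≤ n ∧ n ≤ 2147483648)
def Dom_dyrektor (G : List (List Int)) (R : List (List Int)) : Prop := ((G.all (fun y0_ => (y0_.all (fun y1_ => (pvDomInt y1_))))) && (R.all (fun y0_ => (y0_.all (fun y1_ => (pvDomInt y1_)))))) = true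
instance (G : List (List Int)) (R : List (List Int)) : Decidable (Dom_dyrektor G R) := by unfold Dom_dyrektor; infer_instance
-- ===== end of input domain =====

-- B returns the same value as A by a different decomposition: the edge filter keeps the occurrences
-- of j beyond R[i]'s multiplicity via two counters (A mutates R in place, B leaves R unchanged; the
-- equivalence is about the return value), and the Euler walk assembles the cycle front-to-back from
-- per-vertex child segments instead of A's vertex stack + postorder cycle list + final reversal.

-- shared Python-list primitives: `g[v]` / in-place `g[v] = l` with Python's negative-index rule
-- (out-of-range reads yield [] / writes are dropped; such inputs raise in Python and are outside Pre_)
def vidx (n : Nat) (v : Int) : Option Nat :=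
  let w := if v < 0 then v + n else v
  if 0 ≤ w ∧ w < (n : Int) then some w.toNat else none

def vget (g : List (List Int)) (v : Int) : List Int :=
  match vidx g.length v with
  | some w => g.getD w []
  | none => []

def vset (g : List (List Int)) (v : Int) (l : List Int) : List (List Int) :=
  match vidx g.length v with
  | some w => g.set w l
  | none => g

-- total number of edges left in the adjacency lists: both ports' loops use it as fuel
def ecount (g : List (List Int)) : Nat := (g.map List.length).sum

-- ===== PORT A =====
-- inner double loop of A: one row of L (append-as-cons), consuming R[i] by remove-first-occurrence
def rowA : List Int → List Int → List Int
  | [], _ => []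
  | j :: js, r => if j ∈ r then rowA js (r.erase j) else j :: rowA js r

def buildA (G R : List (List Int)) : List (List Int) :=
  (List.range G.length).map (fun i => rowA (G.getD i []) (R.getD i []))

-- find_eulerian_cycle: the while-stack loop, the list's head being the stack top; each iteration
-- decreases 2*edges + stack height (initially 2*ecount+1), so with the fuel dyrektor passes the
-- 0 branch is never reached and the recursion is exactly A's loop
def loopA : Nat → List (List Int) → List Int → List Int → List Int
  | 0, _, _, cycle => cycle.reverse
  | fuel+1, g, stack, cycle =>
    match stack with
    | [] => cycle.reverse
    | v :: s =>
      match (vget g v).getLast? with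
      | some j => loopA fuel (vset g v (vget g v).dropLast) (j :: v :: s) cycle
      | none => loopA fuel g s (cycle ++ [v])

def dyrektor (G : List (List Int)) (R : List (List Int)) : List Int :=
  loopA (2 * ecount (buildA G R) + 2) (buildA G R) [0] []

-- ===== PORT B =====
-- one row of L: `seen`/`quota` counters, keep j when its occurrence number exceeds the quota
def rowB : List Int → PySem.Dict Int Int → PySem.Dict Int Int → List Int
  | [], _, _ => []
  | j :: js, quota, seen =>
    let c := seen.getD j 0 + 1
    let seen' := seen.insert j c
    if c > quota.getD j 0 then j :: rowB js quota seen' else rowB js quota seen'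

def buildB (G R : List (List Int)) : List (List Int) :=
  (List.range G.length).map (fun i =>
    let gi := G.getD i []
    if gi = [] then []
    else rowB gi ((R.getD i []).foldl (fun d x => d.insert x (d.getD x 0 + 1)) PySem.Dict.empty)
           PySem.Dict.empty)

-- the frame loop of Source B is exactly this recursion: each `some` step handles the last edge's child
-- frame (r1) and then the continuation of v's own frame (r2); the returned segment is already the
-- final-order cycle piece for v (Source B's `seg = [v]; while segs: seg += segs.pop()` composition), so
-- dyrektor_alt performs no reversal; each step removes an edge, so fuel = ecount suffices and the
-- 0 branch is never reached
def dfsB : Nat → List (List Int) → Int → List (List Int) × List Int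
  | 0, g, v => (g, [v])
  | fuel+1, g, v =>
    match (vget g v).getLast? with
    | none => (g, [v])
    | some j =>
      let r1 := dfsB fuel (vset g v (vget g v).dropLast) j
      let r2 := dfsB fuel r1.1 v
      (r2.1, r2.2 ++ r1.2)

def dyrektor_alt (G : List (List Int)) (R : List (List Int)) : List Int :=
  (dfsB (ecount (buildB G R)) (buildB G R) 0).2

-- ===== PRECONDITION & SPEC =====
-- helpers for Pre_ only, all closed-form: an edge v→j survives A's filter iff j occurs more often
-- in G[v] than in R[v] (the filter removes exactly min(count) occurrences); `reach` is the set of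
-- vertices reachable from 0 along surviving edges (n rounds of neighbour closure)
def keptTargets (G R : List (List Int)) (v : Nat) : List Int :=
  (G.getD v []).filter (fun j => (R.getD v []).count j < (G.getD v []).count j)

def normV (n : Nat) (j : Int) : Option Nat :=
  let w := if j < 0 then j + n else j
  if 0 ≤ w ∧ w < (n : Int) then some w.toNat else none

def reachStep (G R : List (List Int)) (s : List Nat) : List Nat :=
  s.foldl (fun acc v =>
    (keptTargets G R v).foldl (fun acc j =>
      match normV G.length j with
      | some w => if w ∈ acc then acc else acc ++ [w]
      | none => acc) acc) s

def reach (G R : List (List Int)) : List Nat := (reachStep G R)^[G.length] [0]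

-- Pre_ excludes exactly the inputs on which the Python A raises IndexError: empty G (graph[0]),
-- a nonempty row G[i] with i ≥ len(R) (R[i] in the filter), or a surviving edge with out-of-range
-- target at a vertex reachable from 0 in the filtered graph — A's walk visits exactly the
-- reachable vertices and drains all their edges, so it pops such a target and raises; otherwise A
-- returns.
def Pre_dyrektor (G : List (List Int)) (R : List (List Int)) : Prop :=
  G ≠ [] ∧
  (∀ i < G.length, G.getD i [] ≠ [] → i < R.length) ∧
  (∀ v ∈ reach G R, ∀ j ∈ keptTargets G R v, 0 ≤ j + G.length ∧ j < G.length)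

instance (G : List (List Int)) (R : List (List Int)) : Decidable (Pre_dyrektor G R) := by
  unfold Pre_dyrektor; infer_instance

def pvWitness_dyrektor : List (List Int) × List (List Int) := ([[1], [0]], [[], []])

def Spec_dyrektor (G : List (List Int)) (R : List (List Int)) (out : List Int) : Prop := out = dyrektor_alt G R
instance (G : List (List Int)) (R : List (List Int)) (out : List Int) : Decidable (Spec_dyrektor G R out) := by unfold Spec_dyrektor; infer_instance

-- ===== CLAIM (what is proved, stated in full; the proofs are below) =====
def Claim_equal_dyrektor : Prop := ∀ (G : List (List Int)) (R : List (List Int)), Dom_dyrektor G R → Pre_dyrektor G R → Spec_dyrektor G R (dyrektor G R)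

-- ===== LEMMAS AND PROOFS =====

-- edge-count bookkeeping
theorem ecount_set_add (g : List (List Int)) (w : Nat) (l : List Int) (hw : w < g.length) :
    ecount (g.set w l) + (g.getD w []).length = ecount g + l.length := by
  induction g generalizing w with
  | nil => simp at hw
  | cons a t ih =>
    cases w with
    | zero => simp [ecount]; omega
    | succ w =>
      simp only [List.set_cons_succ, ecount, List.map_cons, List.sum_cons, List.getD_cons_succ]
      have := ih w (by simpa using hw)
      simp only [ecount] at this
      omega

theorem getD_len_le_ecount (g : List (List Int)) (w : Nat) : (g.getD w []).length ≤ ecount g := by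
  induction g generalizing w with
  | nil => simp
  | cons a t ih =>
    cases w with
    | zero => simp [ecount]
    | succ w =>
      have := ih w
      simp only [List.getD_cons_succ, ecount, List.map_cons, List.sum_cons] at *
      omega

theorem vget_len_le (g : List (List Int)) (v : Int) : (vget g v).length ≤ ecount g := by
  unfold vget
  cases vidx g.length v with
  | none => simp
  | some w => exact getD_len_le_ecount g w

theorem ecount_pos_of_last (g : List (List Int)) (v : Int) (j : Int)
    (h : (vget g v).getLast? = some j) : 1 ≤ ecount g := by
  have hne : vget g v ≠ [] := by intro he; rw [he] at h; simp at h
  have := vget_len_le g v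
  have : 0 < (vget g v).length := List.length_pos_iff.mpr hne
  have := vget_len_le g v
  omega

theorem ecount_pop_lt (g : List (List Int)) (v : Int) (j : Int)
    (h : (vget g v).getLast? = some j) :
    ecount (vset g v (vget g v).dropLast) < ecount g := by
  have hne : vget g v ≠ [] := by intro he; rw [he] at h; simp at h
  cases hidx : vidx g.length v with
  | none => exact absurd (by simp [vget, hidx]) hne
  | some w =>
    have hv : vget g v = g.getD w [] := by simp [vget, hidx]
    have hs : vset g v (vget g v).dropLast = g.set w (vget g v).dropLast := by
      simp [vset, hidx]
    have hw : w < g.length := by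
      simp only [vidx] at hidx
      split at hidx <;> split at hidx <;>
        first
          | (injection hidx with hh; omega)
          | simp at hidx
    have h2 := ecount_set_add g w (vget g v).dropLast hw
    have hlen : (vget g v).length ≠ 0 := by
      intro h0; exact hne (List.eq_nil_of_length_eq_zero h0)
    have hd : (vget g v).dropLast.length = (vget g v).length - 1 := by
      simp [List.length_dropLast]
    rw [hs]
    rw [← hv] at h2
    omega

-- unfolding facts for the fuelled recursions
theorem loopA_nil_any (f : Nat) (g : List (List Int)) (c : List Int) :
    loopA f g [] c = c.reverse := by
  cases f <;> rfl

theorem dfsB_none_any (f : Nat) (g : List (List Int)) (v : Int)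
    (h : (vget g v).getLast? = none) : dfsB f g v = (g, [v]) := by
  cases f with
  | zero => rfl
  | succ f => simp [dfsB, h]

theorem dfsB_succ_some (f : Nat) (g : List (List Int)) (v j : Int)
    (h : (vget g v).getLast? = some j) :
    dfsB (f+1) g v =
      ((dfsB f (dfsB f (vset g v (vget g v).dropLast) j).1 v).1,
       (dfsB f (dfsB f (vset g v (vget g v).dropLast) j).1 v).2 ++
       (dfsB f (vset g v (vget g v).dropLast) j).2) := by
  simp [dfsB, h]

theorem loopA_succ_some (f : Nat) (g : List (List Int)) (v j : Int) (s c : List Int)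
    (h : (vget g v).getLast? = some j) :
    loopA (f+1) g (v :: s) c = loopA f (vset g v (vget g v).dropLast) (j :: v :: s) c := by
  simp [loopA, h]

theorem loopA_succ_none (f : Nat) (g : List (List Int)) (v : Int) (s c : List Int)
    (h : (vget g v).getLast? = none) :
    loopA (f+1) g (v :: s) c = loopA f g s (c ++ [v]) := by
  simp [loopA, h]

-- dfsB never increases the edge count
theorem ecount_dfsB_le (f : Nat) : ∀ (g : List (List Int)) (v : Int),
    ecount (dfsB f g v).1 ≤ ecount g := by
  induction f with
  | zero => intro g v; exact Nat.le_refl _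
  | succ f ih =>
    intro g v
    cases h : (vget g v).getLast? with
    | none => rw [dfsB_none_any _ _ _ h]
    | some j =>
      rw [dfsB_succ_some f g v j h]
      exact Nat.le_trans (ih _ v) (Nat.le_trans (ih _ j)
        (Nat.le_of_lt (ecount_pop_lt g v j h)))

-- loopA's value does not depend on a sufficient fuel either
theorem loopA_fuel (f1 : Nat) : ∀ (f2 : Nat) (g : List (List Int)) (st c : List Int),
    2 * ecount g + st.length ≤ f1 → 2 * ecount g + st.length ≤ f2 →
    loopA f1 g st c = loopA f2 g st c := by
  induction f1 with
  | zero =>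
    intro f2 g st c h1 _
    have : st = [] := by
      cases st with
      | nil => rfl
      | cons a t => simp only [List.length_cons] at h1; omega
    subst this
    rw [loopA_nil_any, loopA_nil_any]
  | succ f1 ih =>
    intro f2 g st c h1 h2
    cases st with
    | nil => rw [loopA_nil_any, loopA_nil_any]
    | cons v s =>
      have hf2 : f2 ≠ 0 := by simp at h2 ⊢; omega
      cases f2 with
      | zero => omega
      | succ f2 =>
        simp only [List.length_cons] at h1 h2
        cases h : (vget g v).getLast? with
        | some j =>
          have hlt := ecount_pop_lt g v j h
          rw [loopA_succ_some f1 g v j s c h, loopA_succ_some f2 g v j s c h]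
          exact ih f2 _ _ c (by simp only [List.length_cons]; omega)
            (by simp only [List.length_cons]; omega)
        | none =>
          rw [loopA_succ_none f1 g v s c h, loopA_succ_none f2 g v s c h]
          exact ih f2 _ _ _ (by omega) (by omega)

-- the filtering passes agree: `quota.getD x 0 - seen.getD x 0` (clamped at 0) tracks exactly
-- the number of x's still present in A's shrinking copy of R[i]
theorem rowB_eq_rowA (js : List Int) : ∀ (r : List Int) (quota seen : PySem.Dict Int Int),
    (∀ x : Int, (r.count x : Int) = max (quota.getD x 0 - seen.getD x 0) 0) →
    rowB js quota seen = rowA js r := by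
  induction js with
  | nil => intro r _ _ _; rfl
  | cons j js ih =>
    intro r quota seen hinv
    have hj := hinv j
    by_cases hm : j ∈ r
    · have hc : 0 < r.count j := List.count_pos_iff.mpr hm
      have hkeep : ¬ (seen.getD j 0 + 1 > quota.getD j 0) := by omega
      simp only [rowB, rowA, if_pos hm, if_neg hkeep]
      apply ih (r.erase j)
      intro x
      rw [PySem.Dict.getD_insert]
      by_cases hx : x = j
      · subst hx
        rw [if_pos rfl, List.count_erase_self]
        have := hinv x
        omega
      · rw [if_neg hx, List.count_erase_of_ne hx]
        exact hinv x
    · have hc : r.count j = 0 := by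
        by_contra hc
        exact hm (List.count_pos_iff.mp (Nat.pos_of_ne_zero hc))
      have hkeep : seen.getD j 0 + 1 > quota.getD j 0 := by omega
      simp only [rowB, rowA, if_neg hm, if_pos hkeep]
      refine congrArg (j :: ·) (ih r quota _ ?_)
      intro x
      rw [PySem.Dict.getD_insert]
      by_cases hx : x = j
      · subst hx
        rw [if_pos rfl]
        have := hinv x
        omega
      · rw [if_neg hx]
        exact hinv x

theorem buildB_eq_buildA (G R : List (List Int)) : buildB G R = buildA G R := by
  unfold buildB buildA
  apply List.map_congr_left
  intro i _
  by_cases hgi : G.getD i [] = []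
  · simp only [hgi, if_pos]
    rfl
  · simp only [if_neg hgi]
    apply rowB_eq_rowA
    intro x
    rw [PySem.Dict.getD_foldl_insert_add_one]
    simp

-- the heart: running A's stack loop from vertex v appends the reverse of B's segment for v
theorem loopA_eq_dfsB (N : Nat) : ∀ (g : List (List Int)), ecount g ≤ N →
    ∀ (v : Int) (s c : List Int) (fd f1 : Nat),
      ecount g ≤ fd → 2 * ecount g + s.length + 1 ≤ f1 →
      loopA f1 g (v :: s) c
        = loopA (2 * ecount (dfsB fd g v).1 + s.length) (dfsB fd g v).1 s
            (c ++ (dfsB fd g v).2.reverse) := by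
  induction N with
  | zero =>
    intro g hg v s c fd f1 hfd hf1
    have hlast : (vget g v).getLast? = none := by
      have := vget_len_le g v
      have hz : (vget g v).length = 0 := by omega
      rw [List.eq_nil_of_length_eq_zero hz]
      rfl
    cases f1 with
    | zero => omega
    | succ f1 =>
      rw [loopA_succ_none f1 g v s c hlast, dfsB_none_any fd g v hlast]
      show loopA f1 g s (c ++ [v]) = loopA (2 * ecount g + s.length) g s (c ++ [v])
      exact loopA_fuel f1 _ g s _ (by omega) (by omega)
  | succ N ih =>
    intro g hg v s c fd f1 hfd hf1
    cases h : (vget g v).getLast? with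
    | none =>
      cases f1 with
      | zero => omega
      | succ f1 =>
        rw [loopA_succ_none f1 g v s c h, dfsB_none_any fd g v h]
        show loopA f1 g s (c ++ [v]) = loopA (2 * ecount g + s.length) g s (c ++ [v])
        exact loopA_fuel f1 _ g s _ (by omega) (by omega)
    | some j =>
      have hpos := ecount_pos_of_last g v j h
      have hlt := ecount_pop_lt g v j h
      cases fd with
      | zero => omega
      | succ fd =>
      cases f1 with
      | zero => omega
      | succ f1 =>
        rw [loopA_succ_some f1 g v j s c h]
        have hg' : ecount (vset g v (vget g v).dropLast) ≤ N := by omega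
        rw [ih _ hg' j (v :: s) c fd f1 (by omega) (by simp only [List.length_cons]; omega)]
        have hr1 := ecount_dfsB_le fd (vset g v (vget g v).dropLast) j
        have hstk : (2 : Nat) * ecount (dfsB fd (vset g v (vget g v).dropLast) j).1
            + (v :: s).length
            = 2 * ecount (dfsB fd (vset g v (vget g v).dropLast) j).1 + s.length + 1 := by
          simp only [List.length_cons]
          omega
        rw [hstk]
        rw [ih _ (by omega) v s _ fd _ (by omega) (by omega)]
        rw [dfsB_succ_some fd g v j h]
        simp [List.append_assoc]

-- ===== VERDICT (by name: the statement is the Claim_ definition above) =====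
theorem dyrektor_spec : Claim_equal_dyrektor := by
  intro G R _ _
  unfold Spec_dyrektor dyrektor dyrektor_alt
  rw [← buildB_eq_buildA]
  rw [loopA_eq_dfsB (ecount (buildB G R)) (buildB G R) (Nat.le_refl _) 0 [] []
        (ecount (buildB G R)) _ (Nat.le_refl _) (by simp only [List.length_nil]; omega)]
  rw [loopA_nil_any]
  simp
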